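-- pv_equiv track=rewrite | github.com/DSSGxMunich/land-sealing-dataset-and-analysis | src/data_pipeline/rplan_content_extraction/rplan_content_extractor.py | _find_closest_chapter_name
-- ===== SOURCE A (Python) =====
-- def _find_closest_chapter_name(index, chapter_names, txt):
--     """Finds the closest chapter name for a given index."""
--     closest_chapter_name = ""
--     closest_position = -1  # set to high number
--     for i, chapter_name in enumerate(chapter_names):
--         tmp_position = txt.rfind(chapter_name, 0, index)
--         # if chapter not found -1 is returned and always smaller than closest_position
--         if tmp_position > closest_position:  # chapter name found and closer than previous chapter name
--             closest_chapter_name = chapter_name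
--             closest_position = tmp_position
--     return closest_chapter_name
-- ===== SOURCE B (Python) =====
-- def _find_closest_chapter_name(index, chapter_names, txt):
--     """Finds the closest chapter name for a given index.
--
--     Single right-to-left scan over the prefix of txt: the first position
--     (from the end of the prefix downwards) where any chapter name occurs
--     wins; ties at the same position go to the earlier name in the list.
--     """
--     n = len(txt)
--     end = max(0, n + index) if index < 0 else min(n, index)
--     for pos in range(end, -1, -1):
--         for name in chapter_names:
--             if pos + len(name) <= end and txt.startswith(name, pos):
--                 return name
--     return ""
-- ===== Notes on version B (the rewrite author's own statement) =====
-- stated objective: alternative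
-- what changed: Replaces the per-name rfind-over-the-whole-prefix maximisation with a single right-to-left scan of positions in the prefix that returns the first name occurring at the rightmost position, so the max/tie-break bookkeeping disappears and the scan stops at the first hit.
import Mathlib
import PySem

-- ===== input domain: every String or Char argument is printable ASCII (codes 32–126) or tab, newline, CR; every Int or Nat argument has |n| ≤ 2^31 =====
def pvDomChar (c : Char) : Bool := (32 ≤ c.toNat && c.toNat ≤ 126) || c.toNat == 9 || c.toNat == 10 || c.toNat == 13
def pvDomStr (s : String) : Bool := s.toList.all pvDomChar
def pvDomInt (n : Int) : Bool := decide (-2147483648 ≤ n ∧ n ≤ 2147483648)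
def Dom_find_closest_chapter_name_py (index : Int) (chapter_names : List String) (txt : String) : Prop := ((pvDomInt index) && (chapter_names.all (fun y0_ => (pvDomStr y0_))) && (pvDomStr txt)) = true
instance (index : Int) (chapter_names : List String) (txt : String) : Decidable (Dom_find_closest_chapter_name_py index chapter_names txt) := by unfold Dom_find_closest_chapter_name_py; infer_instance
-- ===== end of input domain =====

-- B replaces A's per-name rfind maximisation by one right-to-left scan of the
-- prefix that returns the first name found at the rightmost position
-- (objective: alternative algorithm, same worst-case cost, early exit).

-- ===== PORT A =====
def find_closest_chapter_name_py (index : Int) (chapter_names : List String) (txt : String) : String :=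
  (chapter_names.foldl
    (fun (acc : String × Int) chapter_name =>
      let tmp_position := PySem.Str.rfindFrom txt chapter_name 0 (some index)
      if acc.2 < tmp_position then (chapter_name, tmp_position) else acc)
    ("", -1)).1

-- ===== PORT B =====
-- end = max(0, n + index) if index < 0 else min(n, index)
def pvBEnd (index : Int) (n : Nat) : Nat :=
  if index < 0 then ((n : Int) + index).toNat else min n index.toNat

-- pos + len(name) <= end and txt.startswith(name, pos)
-- (startswith with a start argument: exact as isPrefixOf on drop, since 0 ≤ pos here)
def pvBMatch (txt : List Char) (endN pos : Nat) (name : String) : Bool :=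
  decide (pos + name.toList.length ≤ endN) && name.toList.isPrefixOf (txt.drop pos)

-- the outer 'for pos in range(end, -1, -1)' loop; the inner for-with-return is find?
def pvBLoop (chapter_names : List String) (txt : List Char) (endN : Nat) : Nat → String
  | 0 => (chapter_names.find? (pvBMatch txt endN 0)).getD ""
  | pos+1 =>
    match chapter_names.find? (pvBMatch txt endN (pos+1)) with
    | some name => name
    | none => pvBLoop chapter_names txt endN pos

def find_closest_chapter_name_py_alt (index : Int) (chapter_names : List String) (txt : String) : String :=
  pvBLoop chapter_names txt.toList (pvBEnd index txt.toList.length) (pvBEnd index txt.toList.length)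

-- ===== PRECONDITION & SPEC =====
def Spec_find_closest_chapter_name_py (index : Int) (chapter_names : List String) (txt : String) (out : String) : Prop := out = find_closest_chapter_name_py_alt index chapter_names txt
instance (index : Int) (chapter_names : List String) (txt : String) (out : String) : Decidable (Spec_find_closest_chapter_name_py index chapter_names txt out) := by unfold Spec_find_closest_chapter_name_py; infer_instance

-- ===== CLAIM (what is proved, stated in full; the proofs are below) =====
def Claim_equal_find_closest_chapter_name_py : Prop := ∀ (index : Int) (chapter_names : List String) (txt : String), Dom_find_closest_chapter_name_py index chapter_names txt → Spec_find_closest_chapter_name_py index chapter_names txt (find_closest_chapter_name_py index chapter_names txt)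

-- ===== LEMMAS AND PROOFS =====

-- A's loop body, abstracted over the per-name position function
def pvStep (f : String → Int) (acc : String × Int) (nm : String) : String × Int :=
  let t := f nm
  if acc.2 < t then (nm, t) else acc

theorem pvGo_zero (s sub : List Char) :
    PySem.Chars.rfind.go s sub 0 = if sub.isPrefixOf s then 0 else -1 := by
  rw [PySem.Chars.rfind.go]

theorem pvGo_succ (s sub : List Char) (j : Nat) :
    PySem.Chars.rfind.go s sub (j+1)
      = if sub.isPrefixOf (s.drop (j+1)) then ((j:Int)+1) else PySem.Chars.rfind.go s sub j := by
  rw [PySem.Chars.rfind.go]; split <;> simp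

theorem pvGo_le (s sub : List Char) (j : Nat) : PySem.Chars.rfind.go s sub j ≤ (j : Int) := by
  induction j with
  | zero => rw [pvGo_zero]; split <;> simp
  | succ j ih =>
    rw [pvGo_succ]; split
    · push_cast; omega
    · push_cast; omega

-- A's fold never moves once every remaining position is no better
theorem pvFold_stay (f : String → Int) (names : List String) (acc : String × Int)
    (h : ∀ nm ∈ names, f nm ≤ acc.2) : names.foldl (pvStep f) acc = acc := by
  induction names generalizing acc with
  | nil => rfl
  | cons nm names ih =>
    have h1 : f nm ≤ acc.2 := h nm (List.mem_cons_self ..)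
    have : pvStep f acc nm = acc := by simp [pvStep]; omega
    rw [List.foldl_cons, this]
    exact ih acc (fun x hx => h x (List.mem_cons_of_mem _ hx))

-- A's fold returns the FIRST name attaining the strict maximum B of the positions
theorem pvFold_max (f : String → Int) (names : List String) (B : Int) (w : String)
    (acc : String × Int) (hacc : acc.2 < B) (hle : ∀ nm ∈ names, f nm ≤ B)
    (hfind : names.find? (fun nm => f nm == B) = some w) :
    names.foldl (pvStep f) acc = (w, B) := by
  induction names generalizing acc with
  | nil => simp at hfind
  | cons nm names ih =>
    rw [List.find?_cons] at hfind
    by_cases hB : f nm = B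
    · simp [hB] at hfind
      subst hfind
      have hstep : pvStep f acc nm = (nm, B) := by simp [pvStep, hB]; omega
      rw [List.foldl_cons, hstep]
      exact pvFold_stay f names (nm, B) (fun x hx => hle x (List.mem_cons_of_mem _ hx))
    · have : (f nm == B) = false := by simp [hB]
      rw [this] at hfind; simp at hfind
      rw [List.foldl_cons]
      have hlt : f nm < B := lt_of_le_of_ne (hle nm (List.mem_cons_self ..)) hB
      have hacc' : (pvStep f acc nm).2 < B := by
        simp only [pvStep]; split
        · exact hlt
        · exact hacc
      exact ih _ hacc' (fun x hx => hle x (List.mem_cons_of_mem _ hx)) hfind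

-- B's match test = "name is a prefix of the admitted prefix of txt at pos"
theorem pvMatch_eq (txt : List Char) (endN pos : Nat) (nm : String)
    (hpos : pos ≤ endN) :
    pvBMatch txt endN pos nm = nm.toList.isPrefixOf ((txt.take endN).drop pos) := by
  rw [Bool.eq_iff_iff]
  simp only [pvBMatch, Bool.and_eq_true, decide_eq_true_eq, List.isPrefixOf_iff_prefix,
    List.drop_take, List.prefix_take_iff]
  constructor
  · rintro ⟨h1, h2⟩; exact ⟨h2, by omega⟩
  · rintro ⟨h1, h2⟩; exact ⟨by omega, h1⟩

theorem pvBEnd_le (index : Int) (n : Nat) : pvBEnd index n ≤ n := by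
  unfold pvBEnd; split <;> omega

-- A's rfind(txt, name, 0, index) = the bounded backward search over txt[:end]
theorem pvRFindFrom_eq_go (txt sub : List Char) (index : Int) :
    PySem.Chars.rfindFrom txt sub 0 (some index)
      = PySem.Chars.rfind.go (txt.take (pvBEnd index txt.length)) sub (pvBEnd index txt.length) := by
  have hle := pvBEnd_le index txt.length
  rw [PySem.Chars.rfindFrom, PySem.Chars.rfind]
  have he : (if (txt.length : Int) < index then (txt.length : Int)
      else if index < 0 then (if index + txt.length < 0 then 0 else index + txt.length) else index).toNat
      = pvBEnd index txt.length := by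
    unfold pvBEnd; split_ifs <;> omega
  have hE0 : (0:Int) ≤ (if (txt.length : Int) < index then (txt.length : Int)
      else if index < 0 then (if index + txt.length < 0 then 0 else index + txt.length) else index) := by
    split_ifs <;> omega
  simp only [lt_self_iff_false, if_false, Int.toNat_zero, List.drop_zero, zero_add, he,
    List.length_take]
  have hmin : min (pvBEnd index txt.length) txt.length = pvBEnd index txt.length := by omega
  rw [hmin]
  split_ifs <;> first | rfl | omega

-- MAIN: A's per-name argmax fold bounded at pos = B's backward scan from pos
theorem pvMain (names : List String) (txt : List Char) (endN : Nat) :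
    ∀ pos, pos ≤ endN →
    (names.foldl (pvStep (fun nm => PySem.Chars.rfind.go (txt.take endN) nm.toList pos)) ("", -1)).1
      = pvBLoop names txt endN pos := by
  intro pos
  induction pos with
  | zero =>
    intro _
    cases hfind : names.find? (pvBMatch txt endN 0) with
    | none =>
      have hall := List.find?_eq_none.mp hfind
      rw [pvFold_stay]
      · simp [pvBLoop, hfind]
      · intro nm hnm
        rw [pvGo_zero]
        have hm := pvMatch_eq txt endN 0 nm (Nat.zero_le _)
        simp only [List.drop_zero] at hm
        have hfalse : nm.toList.isPrefixOf (txt.take endN) = false := by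
          rw [← hm]
          simpa using hall nm hnm
        rw [hfalse]; simp
    | some w =>
      have hpred : pvBMatch txt endN 0
          = fun nm => (PySem.Chars.rfind.go (txt.take endN) nm.toList 0 == (0:Int)) := by
        funext nm
        rw [pvMatch_eq txt endN 0 nm (Nat.zero_le _), pvGo_zero]
        simp only [List.drop_zero]
        cases h : nm.toList.isPrefixOf (txt.take endN) <;> simp
      have hfind' := hfind
      rw [hpred] at hfind'
      rw [pvFold_max _ _ 0 w _ (by norm_num)
        (fun nm _ => by simpa using pvGo_le (txt.take endN) nm.toList 0) hfind']
      simp [pvBLoop, hfind]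
  | succ pos ih =>
    intro hpos
    cases hfind : names.find? (pvBMatch txt endN (pos+1)) with
    | some w =>
      have hpred : pvBMatch txt endN (pos+1)
          = fun nm => (PySem.Chars.rfind.go (txt.take endN) nm.toList (pos+1) == ((pos:Int)+1)) := by
        funext nm
        rw [pvMatch_eq txt endN (pos+1) nm hpos, pvGo_succ]
        cases h : nm.toList.isPrefixOf ((txt.take endN).drop (pos+1)) with
        | true => simp
        | false =>
          have hgo := pvGo_le (txt.take endN) nm.toList pos
          have hne : (PySem.Chars.rfind.go (txt.take endN) nm.toList pos == ((pos:Int)+1)) = false := by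
            rw [beq_eq_false_iff_ne]; omega
          simp [hne]
      have hfind' := hfind
      rw [hpred] at hfind'
      rw [pvFold_max _ _ ((pos:Int)+1) w _ (by push_cast; omega)
        (fun nm _ => by
          have := pvGo_le (txt.take endN) nm.toList (pos+1)
          push_cast at this ⊢
          omega) hfind']
      simp [pvBLoop, hfind]
    | none =>
      have hall := List.find?_eq_none.mp hfind
      rw [PySem.List.foldl_congr_mem names _
        (pvStep (fun nm => PySem.Chars.rfind.go (txt.take endN) nm.toList pos)) _
        (fun acc nm hnm => by
          simp only [pvStep]
          have hfalse : nm.toList.isPrefixOf ((txt.take endN).drop (pos+1)) = false := by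
            rw [← pvMatch_eq txt endN (pos+1) nm hpos]
            simpa using hall nm hnm
          rw [pvGo_succ, hfalse]
          simp)]
      rw [ih (by omega)]
      simp [pvBLoop, hfind]

-- ===== VERDICT (by name: the statement is the Claim_ definition above) =====
theorem find_closest_chapter_name_py_spec : Claim_equal_find_closest_chapter_name_py := by
  intro index names txt _
  unfold Spec_find_closest_chapter_name_py
  unfold find_closest_chapter_name_py find_closest_chapter_name_py_alt
  have hfun : (fun (acc : String × Int) chapter_name =>
        let tmp_position := PySem.Str.rfindFrom txt chapter_name 0 (some index)
        if acc.2 < tmp_position then (chapter_name, tmp_position) else acc)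
      = pvStep (fun nm =>
          PySem.Chars.rfind.go (txt.toList.take (pvBEnd index txt.toList.length)) nm.toList
            (pvBEnd index txt.toList.length)) := by
    funext acc nm
    simp only [pvStep, PySem.Str.rfindFrom_eq, pvRFindFrom_eq_go]
  rw [hfun, pvMain names txt.toList (pvBEnd index txt.toList.length) _ (le_refl _)]
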